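-- pv_equiv track=rewrite | github.com/kotekloltrzy/semestr1 | Semestr1/WstepDoProgramowania/zadaniedomowe.py | zad2c
-- ===== SOURCE A (Python) =====
-- def zad2c(z15, z16):
--     odp2c = 0
--     n = z16
--     a = z15
--     for c2 in range(n+1):
--         odp2c += abs(a)
--         a = a + 1
--     return odp2c
-- ===== SOURCE B (Python) =====
-- def zad2c(z15, z16):
--     if z16 < 0:
--         return 0
--     lo = z15
--     hi = z15 + z16
--
--     def tri(x):
--         y = max(x, 0)
--         return y * (y + 1) // 2
--
--     pos = tri(hi) - tri(lo - 1)
--     neg = tri(-lo) - tri(-hi - 1)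
--     return pos + neg
-- ===== Notes on version B (the rewrite author's own statement) =====
-- stated objective: faster
-- what changed: Replaced the O(n) loop summing |a| over the range with an O(1) closed form that splits the run z15..z15+z16 at zero and uses triangular-number formulas.
import Mathlib
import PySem

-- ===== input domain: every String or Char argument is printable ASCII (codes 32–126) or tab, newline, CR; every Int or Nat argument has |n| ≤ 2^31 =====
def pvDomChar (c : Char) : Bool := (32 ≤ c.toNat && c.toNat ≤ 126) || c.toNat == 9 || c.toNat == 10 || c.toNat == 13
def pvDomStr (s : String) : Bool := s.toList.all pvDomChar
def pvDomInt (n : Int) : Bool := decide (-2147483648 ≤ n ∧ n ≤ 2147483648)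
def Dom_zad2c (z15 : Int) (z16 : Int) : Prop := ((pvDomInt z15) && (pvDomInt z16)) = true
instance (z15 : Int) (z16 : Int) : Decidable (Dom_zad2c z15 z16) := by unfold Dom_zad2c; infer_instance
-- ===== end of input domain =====

-- B replaces A's O(n) loop with an O(1) closed form (triangular numbers split at zero); faster (asymptotic).

-- ===== PORT A =====
-- for c2 in range(n+1): odp2c += abs(a); a += 1   — state (odp2c, a) folded over the range
def zad2c (z15 : Int) (z16 : Int) : Int :=
  let n := z16
  let a := z15
  ((PySem.List.pyRange 0 (n + 1) 1).foldl
    (fun (st : Int × Int) _ => (st.1 + |st.2|, st.2 + 1)) (0, a)).1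

-- ===== PORT B =====
-- tri(x) = max(x,0)*(max(x,0)+1)//2
def pvTri (x : Int) : Int :=
  let y := max x 0
  PySem.Int.floordiv (y * (y + 1)) 2

def zad2c_alt (z15 : Int) (z16 : Int) : Int :=
  if z16 < 0 then 0
  else
    let lo := z15
    let hi := z15 + z16
    (pvTri hi - pvTri (lo - 1)) + (pvTri (-lo) - pvTri (-hi - 1))

-- ===== PRECONDITION & SPEC =====
def Spec_zad2c (z15 : Int) (z16 : Int) (out : Int) : Prop := out = zad2c_alt z15 z16
instance (z15 : Int) (z16 : Int) (out : Int) : Decidable (Spec_zad2c z15 z16 out) := by unfold Spec_zad2c; infer_instance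

-- ===== CLAIM (what is proved, stated in full; the proofs are below) =====
def Claim_equal_zad2c : Prop := ∀ (z15 : Int) (z16 : Int), Dom_zad2c z15 z16 → Spec_zad2c z15 z16 (zad2c z15 z16)

-- ===== LEMMAS AND PROOFS =====

theorem pvTri_two (x : Int) : 2 * pvTri x = (max x 0) * (max x 0 + 1) := by
  unfold pvTri
  set y := max x 0 with hy
  have hy0 : 0 ≤ y := le_max_right x 0
  obtain ⟨r, hr⟩ := Int.even_mul_succ_self y
  have : PySem.Int.floordiv (y * (y + 1)) 2 = (y * (y + 1)) / 2 :=
    PySem.Int.floordiv_eq_ediv_of_pos (by omega)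
  rw [this, hr]
  omega

theorem pvTri_step (y : Int) : pvTri y - pvTri (y - 1) = max y 0 := by
  have h1 := pvTri_two y
  have h2 := pvTri_two (y - 1)
  by_cases h : y ≤ 0
  · have e1 : max y 0 = 0 := by omega
    have e2 : max (y - 1) 0 = 0 := by omega
    rw [e1] at h1 ⊢; rw [e2] at h2
    omega
  · have hy : 0 < y := by omega
    have e1 : max y 0 = y := by omega
    have e2 : max (y - 1) 0 = y - 1 := by omega
    rw [e1] at h1 ⊢; rw [e2] at h2
    nlinarith [h1, h2]

-- closed-form value of the loop: sum of |a+i| over m consecutive values starting at a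
def pvClosed (a m : Int) : Int :=
  (pvTri (a + m - 1) - pvTri (a - 1)) + (pvTri (-a) - pvTri (-(a + m - 1) - 1))

theorem pvClosed_zero (a : Int) : pvClosed a 0 = 0 := by
  unfold pvClosed
  have : -(a + 0 - 1) - 1 = -a := by ring
  rw [this]
  ring_nf

theorem pvClosed_succ (a m : Int) : pvClosed a (m + 1) = |a| + pvClosed (a + 1) m := by
  unfold pvClosed
  have s1 := pvTri_step a
  have s2 := pvTri_step (-a)
  have habs : |a| = max a 0 + max (-a) 0 := by
    by_cases h : 0 ≤ a
    · rw [abs_of_nonneg h]; omega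
    · rw [abs_of_neg (by omega : a < 0)]; omega
  have e1 : pvTri (a + (m + 1) - 1) = pvTri (a + 1 + m - 1) := by ring_nf
  have e2 : pvTri (-(a + (m + 1) - 1) - 1) = pvTri (-(a + 1 + m - 1) - 1) := by ring_nf
  have s2' : pvTri (-a) - pvTri (-(a + 1)) = max (-a) 0 := by
    rw [show -(a + 1) = -a - 1 by ring]; exact s2
  have e3 : pvTri (a + 1 - 1) = pvTri a := by ring_nf
  rw [e1, e2, e3]
  omega

theorem pvLoop_eq (l : List Int) (s a : Int) :
    (l.foldl (fun (st : Int × Int) _ => (st.1 + |st.2|, st.2 + 1)) (s, a)).1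
      = s + pvClosed a l.length := by
  induction l generalizing s a with
  | nil => simp [pvClosed_zero]
  | cons x t ih =>
      simp only [List.foldl_cons, List.length_cons]
      rw [ih (s + |a|) (a + 1)]
      push_cast
      rw [pvClosed_succ]
      ring

theorem zad2c_spec : Claim_equal_zad2c := by
  intro z15 z16 _
  unfold Spec_zad2c zad2c zad2c_alt
  rw [pvLoop_eq]
  rw [PySem.List.length_pyRange_one]
  by_cases h : z16 < 0
  · have : (z16 + 1 - 0).toNat = 0 := by omega
    rw [this]
    simp [pvClosed_zero, h]
  · have hn : ¬ z16 < 0 := by omega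
    have : ((z16 + 1 - 0).toNat : Int) = z16 + 1 := by omega
    rw [this]
    simp only [hn, if_false]
    unfold pvClosed
    have e : z15 + (z16 + 1) - 1 = z15 + z16 := by ring
    rw [e, show -(z15 + z16) - 1 = -(z15+z16) - 1 by ring]
    ring_nf
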